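-- pv_equiv track=rewrite | github.com/RGeex/tasks | randomes/strings/little_train.py | little_train
-- ===== SOURCE A (Python) =====
-- def little_train(arr: list[str], r: str = ''):
--     """
--     Проверяет могут ли слова из заданного списка объединиться в 1 непрерывную строку.
--     """
--     if not arr:
--         return True
--     for i, x in enumerate(arr):
--         if not r or r[-1] == x[0]:
--             if little_train(arr[:i] + arr[i+1:], r + x):
--                 return True
--     return False
-- ===== SOURCE B (Python) =====
-- def little_train(arr: list[str], r: str = ''):
--     """
--     Проверяет могут ли слова из заданного списка объединиться в 1 непрерывную строку.
--
--     Bitmask dynamic programming over subsets: reach[mask] is the set of possible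
--     last characters (None = nothing placed yet) of a valid chain using exactly
--     the words selected by mask.
--     """
--     n = len(arr)
--     start = r[-1] if r else None
--     reach = {0: {start}}
--     for mask in range(1, 1 << n):
--         ends = set()
--         for i in range(n):
--             if mask >> i & 1:
--                 w = arr[i]
--                 for c in reach[mask ^ (1 << i)]:
--                     if c is None or c == w[0]:
--                         ends.add(w[-1])
--         reach[mask] = ends
--     return len(reach[(1 << n) - 1]) > 0
-- ===== Notes on version B (the rewrite author's own statement) =====
-- stated objective: alternative
-- what changed: Replaces A's recursive backtracking over word orderings by bitmask dynamic programming over subsets: reach[mask] is the set of possible last characters of a valid chain using exactly the words in mask; B trades A's factorial worst case for a uniform exponential 2^n pass.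
-- outside the precondition, e.g. on little_train(['', 'a'], ''): A returns True, B raises IndexError; on little_train([''], ''): A returns True, B raises IndexError
import Mathlib
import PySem

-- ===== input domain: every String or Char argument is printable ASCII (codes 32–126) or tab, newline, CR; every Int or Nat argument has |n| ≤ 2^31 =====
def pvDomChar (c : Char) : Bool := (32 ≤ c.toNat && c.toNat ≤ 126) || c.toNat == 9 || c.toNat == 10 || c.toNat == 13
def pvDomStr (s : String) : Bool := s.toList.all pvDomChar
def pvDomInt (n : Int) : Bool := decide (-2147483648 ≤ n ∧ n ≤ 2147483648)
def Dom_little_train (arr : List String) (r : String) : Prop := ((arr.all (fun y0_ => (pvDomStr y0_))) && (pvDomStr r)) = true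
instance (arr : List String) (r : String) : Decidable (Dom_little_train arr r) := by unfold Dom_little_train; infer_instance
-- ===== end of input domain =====

-- B replaces A's factorial backtracking over word orderings by bitmask dynamic
-- programming over subsets of words (reach[mask] = possible last characters);
-- equivalence is proved for lists of nonempty words (on empty words A raises
-- IndexError or returns by accident of search order).

-- ===== PORT A =====
def little_train (arr : List String) (r : String) : Bool :=
  if arr.length = 0 then true
  else
    (PySem.List.enumerate arr 0).attach.any (fun p =>
      ((r == "") || (PySem.Str.pyGet? r (-1) == PySem.Str.pyGet? p.1.2 0)) &&
      little_train (PySem.List.slice arr none (some p.1.1) ++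
                    PySem.List.slice arr (some (p.1.1 + 1)) none) (r ++ p.1.2))
termination_by arr.length
decreasing_by
  obtain ⟨k, hk, hp⟩ := (PySem.List.mem_enumerate_iff _ _ _).mp p.2
  rw [hp]
  simp only [zero_add]
  have h1 : ((k : Int) + 1) = (((k + 1 : Nat) : Int)) := by push_cast; ring
  rw [h1, PySem.List.slice_to_natCast, PySem.List.slice_from_natCast]
  simp only [List.length_append, List.length_take, List.length_drop]
  omega

-- ===== PORT B =====
def little_train_alt (arr : List String) (r : String) : Bool :=
  let n := arr.length
  let start : Option Char := if r == "" then none else PySem.Str.pyGet? r (-1)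
  let reach0 : PySem.Dict Nat (PySem.Set (Option Char)) :=
    PySem.Dict.insert PySem.Dict.empty 0 (PySem.Set.add PySem.Set.empty start)
  let reach := (List.range' 1 (2 ^ n - 1)).foldl (fun (reach : PySem.Dict Nat (PySem.Set (Option Char))) (mask : Nat) =>
      let ends := (List.range n).foldl (fun (ends : PySem.Set (Option Char)) (i : Nat) =>
          if (mask >>> i) &&& 1 == 1 then
            let w := PySem.List.pyGetD arr (i : Int) ""
            (PySem.Dict.getD reach (mask ^^^ (1 <<< i)) PySem.Set.empty).foldl
              (fun ends c =>
                if c == none || c == PySem.Str.pyGet? w 0 then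
                  PySem.Set.add ends (PySem.Str.pyGet? w (-1))
                else ends) ends
          else ends) PySem.Set.empty
      PySem.Dict.insert reach mask ends) reach0
  decide (0 < PySem.Set.len (PySem.Dict.getD reach (2 ^ n - 1) PySem.Set.empty))

-- ===== PRECONDITION & SPEC =====
-- Pre_ excludes lists containing an empty word: there A raises IndexError (w[0] /
-- w[-1] on "") or returns a value only by accident of its left-to-right search
-- order, and B itself raises IndexError on such lists.
def Pre_little_train (arr : List String) (r : String) : Prop := ∀ w ∈ arr, w ≠ ""
instance (arr : List String) (r : String) : Decidable (Pre_little_train arr r) := by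
  unfold Pre_little_train; infer_instance

def pvWitness_little_train : List String × String := (["ab", "bc"], "")

def Spec_little_train (arr : List String) (r : String) (out : Bool) : Prop := out = little_train_alt arr r
instance (arr : List String) (r : String) (out : Bool) : Decidable (Spec_little_train arr r out) := by unfold Spec_little_train; infer_instance

-- ===== CLAIM (what is proved, stated in full; the proofs are below) =====
def Claim_equal_little_train : Prop := ∀ (arr : List String) (r : String), Dom_little_train arr r → Pre_little_train arr r → Spec_little_train arr r (little_train arr r)

-- ===== LEMMAS AND PROOFS =====

-- ---- the common specification: a word w is an edge pvHeadc w → pvLastc w;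
-- pvValid c p says the words of p chain up, starting from optional constraint c.
def pvHeadc (w : String) : Option Char := w.toList.head?
def pvLastc (w : String) : Option Char := w.toList.getLast?
def pvOk (c : Option Char) (w : String) : Prop := c = none ∨ c = pvHeadc w

def pvValid : Option Char → List String → Prop
  | _, [] => True
  | c, w :: p => pvOk c w ∧ pvValid (pvLastc w) p

def pvEnd : Option Char → List String → Option Char
  | c, [] => c
  | _, w :: p => pvEnd (pvLastc w) p

def pvEE (c : Option Char) (ws : List String) (c' : Option Char) : Prop :=
  ∃ p, ws.Perm p ∧ pvValid c p ∧ pvEnd c p = c'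

def pvStart (r : String) : Option Char := if r = "" then none else r.toList.getLast?

def pvIdxs (n mask : Nat) : List Nat := (List.range n).filter (fun i => mask.testBit i)
def pvSel (arr : List String) (mask : Nat) : List String :=
  (pvIdxs arr.length mask).map (fun i => arr.getD i "")

-- ---- generic membership in a monotone fold
theorem pvG0 {α β : Type} (x : α) (C : β → Prop) (step : List α → β → List α) :
    ∀ (l : List β), (∀ s b, b ∈ l → (x ∈ step s b ↔ x ∈ s ∨ C b)) →
      ∀ s, (x ∈ List.foldl step s l ↔ x ∈ s ∨ ∃ b ∈ l, C b) := by
  intro l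
  induction l with
  | nil => intro _ s; simp
  | cons b t ih =>
    intro h s
    simp only [List.foldl_cons]
    rw [ih (fun s' b' hb' => h s' b' (List.mem_cons_of_mem _ hb')) _,
        h s b (List.mem_cons_self)]
    simp only [List.mem_cons]
    constructor
    · rintro ((hs | hc) | ⟨b', hb', hc'⟩)
      · exact Or.inl hs
      · exact Or.inr ⟨b, Or.inl rfl, hc⟩
      · exact Or.inr ⟨b', Or.inr hb', hc'⟩
    · rintro (hs | ⟨b', (rfl | hb'), hc'⟩)
      · exact Or.inl (Or.inl hs)
      · exact Or.inl (Or.inr hc')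
      · exact Or.inr ⟨b', hb', hc'⟩

-- ---- valid/end under appending the last word
theorem pvValid_append (q : List String) :
    ∀ (c : Option Char) (x : String),
      pvValid c (q ++ [x]) ↔ pvValid c q ∧ pvOk (pvEnd c q) x := by
  induction q with
  | nil => intro c x; simp [pvValid, pvEnd]
  | cons w t ih =>
    intro c x
    simp only [List.cons_append, pvValid, pvEnd, ih, and_assoc]

theorem pvEnd_append (q : List String) :
    ∀ (c : Option Char) (x : String), pvEnd c (q ++ [x]) = pvLastc x := by
  induction q with
  | nil => intro c x; simp [pvEnd]
  | cons w t ih => intro c x; simp only [List.cons_append, pvEnd, ih]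

theorem pv_take_drop_decomp {α : Type} (l : List α) (k : Nat) (hk : k < l.length) :
    l = l.take k ++ l[k] :: l.drop (k + 1) := by
  conv_lhs => rw [← List.take_append_drop k l]
  congr 1
  exact (List.getElem_cons_drop hk).symm

theorem pv_cons_eraseIdx_perm {α : Type} (l : List α) (k : Nat) (hk : k < l.length) :
    (l[k] :: l.eraseIdx k).Perm l := by
  rw [List.eraseIdx_eq_take_drop_succ]
  conv_rhs => rw [pv_take_drop_decomp l k hk]
  exact List.perm_middle.symm

theorem pv_erase_eq_eraseIdx {α : Type} [DecidableEq α] (l : List α) (hnd : l.Nodup)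
    (k : Nat) (hk : k < l.length) : l.erase l[k] = l.eraseIdx k := by
  obtain ⟨x, hx⟩ : ∃ x, l[k] = x := ⟨l[k], rfl⟩
  have hdec : l = l.take k ++ x :: l.drop (k + 1) := hx ▸ pv_take_drop_decomp l k hk
  have hnotmem : x ∉ l.take k := by
    rw [hdec] at hnd
    rcases List.nodup_append.mp hnd with ⟨-, -, hdisj⟩
    intro hmem
    exact hdisj x hmem x (List.mem_cons_self ..) rfl
  rw [List.eraseIdx_eq_take_drop_succ, hx]
  conv_lhs => rw [hdec]
  rw [List.erase_append_right _ hnotmem, List.erase_cons_head]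

-- ---- choosing the LAST word of the chain
theorem pvEE_concat_iff (c : Option Char) (ws : List String) (hne : ws ≠ [])
    (c' : Option Char) :
    pvEE c ws c' ↔ ∃ k, ∃ (hk : k < ws.length), ∃ c'',
      pvEE c (ws.eraseIdx k) c'' ∧ pvOk c'' ws[k] ∧ c' = pvLastc ws[k] := by
  constructor
  · rintro ⟨p, hperm, hval, hend⟩
    rcases List.eq_nil_or_concat p with rfl | ⟨q, x, rfl⟩
    · exact absurd (hperm.eq_nil) hne
    · simp only [List.concat_eq_append] at hperm hval hend
      have hx : x ∈ ws := hperm.symm.subset (by simp)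
      obtain ⟨k, hk, hxk⟩ := List.mem_iff_getElem.mp hx
      have h1 : (x :: ws.eraseIdx k).Perm (x :: q) := by
        have h2 : (x :: ws.eraseIdx k).Perm ws := hxk ▸ pv_cons_eraseIdx_perm ws k hk
        exact h2.trans (hperm.trans (List.perm_append_singleton x q))
      refine ⟨k, hk, pvEnd c q, ⟨q, h1.cons_inv, ((pvValid_append q c x).mp hval).1, rfl⟩,
        ?_, ?_⟩
      · rw [hxk]
        exact ((pvValid_append q c x).mp hval).2
      · rw [hxk, ← hend, pvEnd_append]
  · rintro ⟨k, hk, c'', ⟨p', hperm', hval', hend'⟩, hok, hc'⟩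
    refine ⟨p' ++ [ws[k]], ?_, ?_, ?_⟩
    · have h1 : ws.Perm (ws[k] :: ws.eraseIdx k) := (pv_cons_eraseIdx_perm ws k hk).symm
      exact h1.trans ((hperm'.cons ws[k]).trans (List.perm_append_singleton ws[k] p').symm)
    · exact (pvValid_append p' c ws[k]).mpr ⟨hval', hend' ▸ hok⟩
    · rw [pvEnd_append, hc']

-- ---- bit manipulation
theorem pv_testbit_port (m i : Nat) : ((m >>> i) &&& 1 == 1) = m.testBit i := by
  simp [Nat.testBit]

theorem pv_shift_pow (i : Nat) : (1 <<< i) = 2 ^ i := by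
  rw [Nat.shiftLeft_eq, one_mul]

theorem pv_xor_lt (m i : Nat) (h : m.testBit i = true) : m ^^^ (1 <<< i) < m := by
  rw [pv_shift_pow]
  apply Nat.lt_of_testBit i
  · simp [Nat.testBit_xor, h]
  · exact h
  · intro j hj
    simp [Nat.testBit_xor, (Nat.ne_of_lt hj)]

theorem pv_nodup_idxs (n mask : Nat) : (pvIdxs n mask).Nodup :=
  List.Nodup.filter _ (List.nodup_range)

theorem pvIdxs_xor (n mask i : Nat) (h : mask.testBit i = true) :
    pvIdxs n (mask ^^^ (1 <<< i)) = (pvIdxs n mask).erase i := by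
  rw [List.Nodup.erase_eq_filter (pv_nodup_idxs n mask) i]
  unfold pvIdxs
  rw [List.filter_filter]
  apply List.filter_congr
  intro j _
  by_cases hji : j = i
  · subst hji
    simp [Nat.testBit_xor, pv_shift_pow, h]
  · simp [Nat.testBit_xor, pv_shift_pow, Ne.symm hji, hji]

-- ---- the DP recurrence at the specification level
theorem pv_exists_bit (n mask : Nat) (h0 : mask ≠ 0) (hm : mask < 2 ^ n) :
    ∃ i, i < n ∧ mask.testBit i = true := by
  by_contra hall
  simp only [not_exists, not_and, Bool.not_eq_true] at hall
  apply h0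
  apply Nat.eq_of_testBit_eq
  intro j
  rw [Nat.zero_testBit]
  by_cases hj : j < n
  · exact hall j hj
  · exact Nat.testBit_lt_two_pow
      (lt_of_lt_of_le hm (Nat.pow_le_pow_right (by omega) (by omega)))

theorem pvSel_length (arr : List String) (mask : Nat) :
    (pvSel arr mask).length = (pvIdxs arr.length mask).length := by
  simp [pvSel]

theorem pvSel_getElem (arr : List String) (mask : Nat) (k : Nat)
    (hk : k < (pvIdxs arr.length mask).length) :
    (pvSel arr mask)[k]'(by simpa [pvSel] using hk) =
      arr.getD (pvIdxs arr.length mask)[k] "" := by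
  simp [pvSel]

theorem pvSel_eraseIdx (arr : List String) (mask : Nat) (k : Nat)
    (hk : k < (pvIdxs arr.length mask).length)
    (i : Nat) (hik : (pvIdxs arr.length mask)[k] = i)
    (hbit : mask.testBit i = true) :
    (pvSel arr mask).eraseIdx k = pvSel arr (mask ^^^ (1 <<< i)) := by
  unfold pvSel
  rw [List.eraseIdx_map]
  congr 1
  rw [pvIdxs_xor _ _ _ hbit, ← hik]
  exact (pv_erase_eq_eraseIdx _ (pv_nodup_idxs arr.length mask) k hk).symm

theorem pvSem_rec (arr : List String) (st : Option Char) (mask : Nat)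
    (h0 : mask ≠ 0) (hm : mask < 2 ^ arr.length) (c' : Option Char) :
    pvEE st (pvSel arr mask) c' ↔
      ∃ i, i < arr.length ∧ mask.testBit i = true ∧ ∃ c,
        pvEE st (pvSel arr (mask ^^^ (1 <<< i))) c ∧
        pvOk c (arr.getD i "") ∧ c' = pvLastc (arr.getD i "") := by
  obtain ⟨i0, hi0n, hbit0⟩ := pv_exists_bit arr.length mask h0 hm
  have hne : pvSel arr mask ≠ [] := by
    have hmem : i0 ∈ pvIdxs arr.length mask :=
      List.mem_filter.mpr ⟨List.mem_range.mpr hi0n, hbit0⟩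
    unfold pvSel
    intro h
    rw [List.map_eq_nil_iff] at h
    rw [h] at hmem
    exact absurd hmem (List.not_mem_nil)
  rw [pvEE_concat_iff _ _ hne]
  constructor
  · rintro ⟨k, hk, c'', hEE, hok, hc'⟩
    have hk' : k < (pvIdxs arr.length mask).length := by
      simpa [pvSel] using hk
    have himem : (pvIdxs arr.length mask)[k] ∈ pvIdxs arr.length mask :=
      List.getElem_mem hk'
    have hin : (pvIdxs arr.length mask)[k] < arr.length :=
      List.mem_range.mp (List.mem_of_mem_filter himem)
    have hbit : mask.testBit (pvIdxs arr.length mask)[k] = true :=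
      by simpa using List.of_mem_filter himem
    refine ⟨(pvIdxs arr.length mask)[k], hin, hbit, c'', ?_, ?_, ?_⟩
    · rw [← pvSel_eraseIdx arr mask k hk' _ rfl hbit]
      exact hEE
    · rw [← pvSel_getElem arr mask k hk']
      exact hok
    · rw [← pvSel_getElem arr mask k hk']
      exact hc'
  · rintro ⟨i, hin, hbit, c'', hEE, hok, hc'⟩
    have himem : i ∈ pvIdxs arr.length mask :=
      List.mem_filter.mpr ⟨List.mem_range.mpr hin, hbit⟩
    obtain ⟨k, hk', hik⟩ := List.mem_iff_getElem.mp himem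
    have hk : k < (pvSel arr mask).length := by
      rw [pvSel_length]; exact hk'
    refine ⟨k, hk, c'', ?_, ?_, ?_⟩
    · rw [pvSel_eraseIdx arr mask k hk' i hik hbit]
      exact hEE
    · have := pvSel_getElem arr mask k hk'
      rw [hik] at this
      rw [this]
      exact hok
    · have := pvSel_getElem arr mask k hk'
      rw [hik] at this
      rw [this]
      exact hc'

-- ---- string-level bridges
theorem pvStr_head (w : String) : PySem.Str.pyGet? w 0 = pvHeadc w := by
  simp [PySem.Str.pyGet?, pvHeadc, PySem.List.pyGet?_zero, List.head?_eq_getElem?]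

theorem pvStr_last (w : String) : PySem.Str.pyGet? w (-1) = pvLastc w := by
  simp [PySem.Str.pyGet?, pvLastc, PySem.List.pyGet?_neg_one]

theorem pv_toList_ne (x : String) (hx : x ≠ "") : x.toList ≠ [] := by
  intro h
  apply hx
  apply String.toList_inj.mp
  simpa using h

theorem pvStart_append (r x : String) (hx : x ≠ "") :
    pvStart (r ++ x) = pvLastc x := by
  have hxl := pv_toList_ne x hx
  have hne : r ++ x ≠ "" := by
    intro h
    apply hxl
    have h2 : r.toList ++ x.toList = [] := by
      have := congrArg String.toList h
      rw [String.toList_append] at this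
      simpa using this
    exact (List.append_eq_nil_iff.mp h2).2
  unfold pvStart pvLastc
  rw [if_neg hne, String.toList_append, List.getLast?_append]
  obtain ⟨c, hc⟩ : ∃ c, x.toList.getLast? = some c := by
    cases h : x.toList.getLast? with
    | none => exact absurd (List.getLast?_eq_none_iff.mp h) hxl
    | some c => exact ⟨c, rfl⟩
  rw [hc]
  rfl

theorem pvCond_iff (r x : String) :
    (((r == "") || (PySem.Str.pyGet? r (-1) == PySem.Str.pyGet? x 0)) = true) ↔
      pvOk (pvStart r) x := by
  by_cases hr : r = ""
  · simp [hr, pvStart, pvOk]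
  · have hrl := pv_toList_ne r hr
    have h1 : (r == "") = false := by simp [hr]
    rw [h1, Bool.false_or, pvStr_head]
    unfold pvOk pvStart
    rw [if_neg hr]
    rw [pvStr_last]
    simp only [pvLastc]
    obtain ⟨c, hc⟩ : ∃ c, r.toList.getLast? = some c := by
      cases h : r.toList.getLast? with
      | none => exact absurd (List.getLast?_eq_none_iff.mp h) hrl
      | some c => exact ⟨c, rfl⟩
    rw [hc]
    simp

-- ---- characterizing port B
def pvD0 (st : Option Char) : PySem.Dict Nat (PySem.Set (Option Char)) :=
  PySem.Dict.insert PySem.Dict.empty 0 (PySem.Set.add PySem.Set.empty st)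

def pvStep (arr : List String) (reach : PySem.Dict Nat (PySem.Set (Option Char)))
    (mask : Nat) : PySem.Dict Nat (PySem.Set (Option Char)) :=
  PySem.Dict.insert reach mask ((List.range arr.length).foldl
    (fun (ends : PySem.Set (Option Char)) (i : Nat) =>
      if (mask >>> i) &&& 1 == 1 then
        (PySem.Dict.getD reach (mask ^^^ (1 <<< i)) PySem.Set.empty).foldl
          (fun ends c =>
            if c == none || c == PySem.Str.pyGet? (PySem.List.pyGetD arr (i : Int) "") 0 then
              PySem.Set.add ends (PySem.Str.pyGet? (PySem.List.pyGetD arr (i : Int) "") (-1))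
            else ends) ends
      else ends) PySem.Set.empty)

theorem pv_ends_mem (arr : List String) (d : PySem.Dict Nat (PySem.Set (Option Char)))
    (m : Nat) (c : Option Char) :
    (c ∈ (List.range arr.length).foldl
      (fun (ends : PySem.Set (Option Char)) (i : Nat) =>
        if (m >>> i) &&& 1 == 1 then
          (PySem.Dict.getD d (m ^^^ (1 <<< i)) PySem.Set.empty).foldl
            (fun ends c =>
              if c == none || c == PySem.Str.pyGet? (PySem.List.pyGetD arr (i : Int) "") 0 then
                PySem.Set.add ends (PySem.Str.pyGet? (PySem.List.pyGetD arr (i : Int) "") (-1))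
              else ends) ends
        else ends) PySem.Set.empty)
    ↔ ∃ i ∈ List.range arr.length, m.testBit i = true ∧
        ∃ b ∈ PySem.Dict.getD d (m ^^^ (1 <<< i)) PySem.Set.empty,
          pvOk b (arr.getD i "") ∧ c = pvLastc (arr.getD i "") := by
  rw [pvG0 c
      (fun i => m.testBit i = true ∧
        ∃ b ∈ PySem.Dict.getD d (m ^^^ (1 <<< i)) PySem.Set.empty,
          pvOk b (arr.getD i "") ∧ c = pvLastc (arr.getD i "")) _ _ ?_ PySem.Set.empty]
  · constructor
    · rintro (habs | h)
      · exact absurd habs (List.not_mem_nil)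
      · obtain ⟨i, hi, h1, h2⟩ := h
        exact ⟨i, hi, h1, h2⟩
    · rintro ⟨i, hi, h1, h2⟩
      exact Or.inr ⟨i, hi, h1, h2⟩
  · intro s i _
    rw [pv_testbit_port]
    by_cases hb : m.testBit i = true
    · rw [if_pos hb]
      rw [pvG0 c
          (fun b => (b = none ∨ b = pvHeadc (arr.getD i "")) ∧
            c = pvLastc (arr.getD i ""))
          _ _ ?_ s]
      · simp only [hb, true_and, pvOk]
      · intro s' b _
        rw [PySem.List.pyGetD_natCast, pvStr_head, pvStr_last]
        by_cases hcb : (b == none || b == pvHeadc (arr.getD i "")) = true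
        · rw [if_pos hcb]
          rw [PySem.Set.mem_add]
          simp only [Bool.or_eq_true, beq_iff_eq] at hcb
          constructor
          · rintro (h | h)
            · exact Or.inl h
            · exact Or.inr ⟨hcb, h⟩
          · rintro (h | ⟨-, h⟩)
            · exact Or.inl h
            · exact Or.inr h
        · rw [if_neg hcb]
          simp only [Bool.or_eq_true, beq_iff_eq] at hcb
          constructor
          · exact fun h => Or.inl h
          · rintro (h | ⟨hor, -⟩)
            · exact h
            · exact absurd hor hcb
    · rw [if_neg hb]
      simp [hb]

theorem pv_inv (arr : List String) (st : Option Char) :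
    ∀ (K : Nat), K ≤ 2 ^ arr.length - 1 → ∀ mask, mask ≤ K → ∀ c,
      (c ∈ PySem.Dict.getD ((List.range' 1 K).foldl (pvStep arr) (pvD0 st)) mask
          PySem.Set.empty
        ↔ pvEE st (pvSel arr mask) c) := by
  intro K
  induction K with
  | zero =>
    intro _ mask hm c
    have hmask : mask = 0 := Nat.le_zero.mp hm
    subst hmask
    simp only [List.range'_zero, List.foldl_nil, pvD0]
    rw [PySem.Dict.getD_insert_self]
    have hsel0 : pvSel arr 0 = [] := by
      simp [pvSel, pvIdxs, Nat.zero_testBit]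
    rw [hsel0, PySem.Set.mem_add]
    simp only [PySem.Set.empty, List.not_mem_nil, false_or]
    constructor
    · rintro rfl
      exact ⟨[], List.Perm.refl _, trivial, rfl⟩
    · rintro ⟨p, hp, -, hend⟩
      rw [List.nil_perm] at hp
      subst hp
      exact hend.symm
  | succ K ihK =>
    intro hK mask hm c
    have hKle : K ≤ 2 ^ arr.length - 1 := by omega
    have hpow : 1 ≤ 2 ^ arr.length := Nat.one_le_two_pow
    rw [List.range'_concat, List.foldl_append, List.foldl_cons, List.foldl_nil]
    have hnew : (1 + 1 * K) = K + 1 := by ring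
    rw [hnew]
    by_cases hmask : mask = K + 1
    · subst hmask
      rw [pvStep, PySem.Dict.getD_insert_self, pv_ends_mem]
      rw [pvSem_rec arr st (K + 1) (by omega) (by omega) c]
      constructor
      · rintro ⟨i, hi, hbit, b, hb, hok, hc⟩
        have hi' : i < arr.length := List.mem_range.mp hi
        have hlt : (K + 1) ^^^ (1 <<< i) < K + 1 := pv_xor_lt _ _ hbit
        exact ⟨i, hi', hbit, b,
          (ihK hKle _ (by omega) b).mp hb, hok, hc⟩
      · rintro ⟨i, hi, hbit, b, hb, hok, hc⟩
        have hlt : (K + 1) ^^^ (1 <<< i) < K + 1 := pv_xor_lt _ _ hbit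
        exact ⟨i, List.mem_range.mpr hi, hbit, b,
          (ihK hKle _ (by omega) b).mpr hb, hok, hc⟩
    · rw [pvStep, PySem.Dict.getD_insert_of_ne _ _ _ hmask]
      exact ihK hKle mask (by omega) c

theorem pvSel_full (arr : List String) : pvSel arr (2 ^ arr.length - 1) = arr := by
  unfold pvSel pvIdxs
  have hf : (List.range arr.length).filter
      (fun i => (2 ^ arr.length - 1).testBit i) = List.range arr.length := by
    rw [List.filter_eq_self]
    intro a ha
    rw [Nat.testBit_two_pow_sub_one]
    simpa using List.mem_range.mp ha
  rw [hf]
  apply List.ext_getElem (by simp)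
  intro i h1 h2
  simp only [List.getElem_map, List.getElem_range]
  exact List.getD_eq_getElem arr "" (by simpa using h2)

theorem pv_alt_char (arr : List String) (r : String) :
    little_train_alt arr r = true ↔ ∃ c', pvEE (pvStart r) arr c' := by
  have hst : (if r == "" then none else PySem.Str.pyGet? r (-1)) = pvStart r := by
    by_cases hr : r = ""
    · simp [hr, pvStart]
    · rw [if_neg (by simp [hr]), pvStr_last]
      simp [pvStart, pvLastc, hr]
  have hport : little_train_alt arr r = decide (0 < PySem.Set.len
      (PySem.Dict.getD
        ((List.range' 1 (2 ^ arr.length - 1)).foldl (pvStep arr)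
          (pvD0 (if r == "" then none else PySem.Str.pyGet? r (-1))))
        (2 ^ arr.length - 1) PySem.Set.empty)) := rfl
  rw [hport, hst]
  have hmain := pv_inv arr (pvStart r) (2 ^ arr.length - 1) le_rfl
    (2 ^ arr.length - 1) le_rfl
  rw [decide_eq_true_iff]
  rw [pvSel_full] at hmain
  constructor
  · intro hlen
    have hne : PySem.Dict.getD
        ((List.range' 1 (2 ^ arr.length - 1)).foldl (pvStep arr)
          (pvD0 (pvStart r))) (2 ^ arr.length - 1) PySem.Set.empty ≠ [] := by
      intro h
      rw [h] at hlen
      simp [PySem.Set.len] at hlen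
    obtain ⟨c, hc⟩ := List.exists_mem_of_ne_nil _ hne
    exact ⟨c, (hmain c).mp hc⟩
  · rintro ⟨c', hc'⟩
    have hc := (hmain c').mpr hc'
    have hpos : 0 < (PySem.Dict.getD
        ((List.range' 1 (2 ^ arr.length - 1)).foldl (pvStep arr)
          (pvD0 (pvStart r))) (2 ^ arr.length - 1) PySem.Set.empty).length :=
      List.length_pos_of_mem hc
    simpa [PySem.Set.len] using hpos

-- ---- characterizing port A
theorem pvA_char_aux : ∀ (n : Nat) (arr : List String) (r : String),
    arr.length = n → (∀ w ∈ arr, w ≠ "") →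
    (little_train arr r = true ↔ ∃ p, arr.Perm p ∧ pvValid (pvStart r) p) := by
  intro n
  induction n using Nat.strong_induction_on with
  | _ n ih =>
    intro arr r hlen hw
    by_cases h0 : arr.length = 0
    · have harr : arr = [] := List.eq_nil_of_length_eq_zero h0
      subst harr
      constructor
      · intro _
        exact ⟨[], List.Perm.refl _, trivial⟩
      · intro _
        rw [little_train]
        simp
    · rw [little_train, if_neg h0, List.any_eq_true]
      have hn1 : 1 ≤ n := by omega
      constructor
      · rintro ⟨⟨y, hy⟩, -, hf⟩
        obtain ⟨k, hk, rfl⟩ := (PySem.List.mem_enumerate_iff _ _ _).mp hy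
        simp only [zero_add, Bool.and_eq_true] at hf
        obtain ⟨hcond, hrec⟩ := hf
        have hslice : PySem.List.slice arr none (some ((k : Int))) ++
            PySem.List.slice arr (some ((k : Int) + 1)) none = arr.eraseIdx k := by
          have h1 : ((k : Int) + 1) = (((k + 1 : Nat)) : Int) := by push_cast; ring
          rw [h1, PySem.List.slice_to_natCast, PySem.List.slice_from_natCast,
            ← List.eraseIdx_eq_take_drop_succ]
        rw [hslice] at hrec
        have hlen' : (arr.eraseIdx k).length = n - 1 := by
          rw [List.length_eraseIdx_of_lt hk]
          omega
        have hxk_ne : arr[k] ≠ "" := hw _ (List.getElem_mem hk)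
        have hIH := ih (n - 1) (by omega) (arr.eraseIdx k) (r ++ arr[k]) hlen'
          (fun w hwm => hw w (List.mem_of_mem_eraseIdx hwm))
        obtain ⟨p', hperm', hval'⟩ := hIH.mp hrec
        rw [pvStart_append _ _ hxk_ne] at hval'
        refine ⟨arr[k] :: p', ?_, ?_⟩
        · exact (pv_cons_eraseIdx_perm arr k hk).symm.trans (hperm'.cons _)
        · exact ⟨(pvCond_iff r arr[k]).mp hcond, hval'⟩
      · rintro ⟨p, hperm, hval⟩
        have hpne : p ≠ [] := by
          intro h
          subst h
          exact h0 (by simpa using hperm.length_eq)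
        obtain ⟨x, p', rfl⟩ := List.exists_cons_of_ne_nil hpne
        have hok : pvOk (pvStart r) x := hval.1
        have hval' : pvValid (pvLastc x) p' := hval.2
        have hx : x ∈ arr := hperm.mem_iff.mpr (by simp)
        obtain ⟨k, hk, hxk⟩ := List.mem_iff_getElem.mp hx
        have hperm' : (arr.eraseIdx k).Perm p' := by
          have h2 : (x :: arr.eraseIdx k).Perm (x :: p') :=
            (hxk ▸ pv_cons_eraseIdx_perm arr k hk).trans hperm
          exact h2.cons_inv
        refine ⟨⟨(0 + (k : Int), arr[k]),
          (PySem.List.mem_enumerate_iff _ _ _).mpr ⟨k, hk, rfl⟩⟩,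
          List.mem_attach _ _, ?_⟩
        simp only [zero_add, Bool.and_eq_true]
        have hslice : PySem.List.slice arr none (some ((k : Int))) ++
            PySem.List.slice arr (some ((k : Int) + 1)) none = arr.eraseIdx k := by
          have h1 : ((k : Int) + 1) = (((k + 1 : Nat)) : Int) := by push_cast; ring
          rw [h1, PySem.List.slice_to_natCast, PySem.List.slice_from_natCast,
            ← List.eraseIdx_eq_take_drop_succ]
        constructor
        · exact (pvCond_iff r arr[k]).mpr (hxk ▸ hok)
        · rw [hslice]
          have hlen' : (arr.eraseIdx k).length = n - 1 := by
            rw [List.length_eraseIdx_of_lt hk]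
            omega
          have hIH := ih (n - 1) (by omega) (arr.eraseIdx k) (r ++ arr[k]) hlen'
            (fun w hwm => hw w (List.mem_of_mem_eraseIdx hwm))
          apply hIH.mpr
          refine ⟨p', hperm', ?_⟩
          rw [pvStart_append _ _ (hw _ (List.getElem_mem hk)), hxk]
          exact hval'

theorem pvA_char (arr : List String) (r : String) (hw : ∀ w ∈ arr, w ≠ "") :
    little_train arr r = true ↔ ∃ p, arr.Perm p ∧ pvValid (pvStart r) p :=
  pvA_char_aux arr.length arr r rfl hw

-- ===== VERDICT (by name: the statement is the Claim_ definition above) =====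
theorem little_train_spec : Claim_equal_little_train := by
  intro arr r _ hpre
  unfold Spec_little_train
  have hA := pvA_char arr r hpre
  have hB := pv_alt_char arr r
  cases hA' : little_train arr r
  · cases hB' : little_train_alt arr r
    · rfl
    · exfalso
      obtain ⟨c', p, hperm, hval, -⟩ := hB.mp hB'
      exact absurd (hA.mpr ⟨p, hperm, hval⟩) (by simp [hA'])
  · obtain ⟨p, hperm, hval⟩ := hA.mp hA'
    exact (hB.mpr ⟨pvEnd (pvStart r) p, p, hperm, hval, rfl⟩).symm
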